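-- pv_equiv track=rewrite | github.com/sheldonl3/python_learning | algorithm/sf.py | getprv
-- ===== SOURCE A (Python) =====
-- def getprv(num):
--     tmp=num
--     c0=0
--     c1=0
--     while tmp&1==1:
--         c1+=1
--         tmp>>=1
--     if tmp==0:
--         return -1
--     while tmp&1==0 and tmp!=0:
--         c0+=1
--         tmp>>=1
--     p=c0+c1
--     num&=((~0)<<(p+1))
--     mask=(1<<(c1+1))-1
--     num|=mask<<(c0-1)
--     return num
-- ===== SOURCE B (Python) =====
-- def getprv(num):
--     # closed-form "previous snoob": no counting loops
--     m = num & (num + 1)          # clear the trailing block of ones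
--     if m == 0:                   # num is 0 or all-ones (2^k - 1): no smaller value exists
--         return -1
--     r = m & -m                   # 1 << p, the lowest set bit with a zero below it
--     ones = num ^ m               # mask of the trailing ones, 2^c1 - 1
--     step = r // (2 * (ones + 1)) # 1 << (c0 - 1)
--     return num - r - ones + step * (2 * ones + 1)
-- ===== Notes on version B (the rewrite author's own statement) =====
-- stated objective: alternative
-- what changed: Replaces A's two counting while-loops by the closed-form 'previous snoob' bit trick: num&(num+1) removes the trailing-ones block, m&-m isolates the pivot bit, num^m recovers the trailing-ones mask, and one division repacks the ones a position lower; Pre_ excludes only the all-ones negative integer, on which A's first while loop never terminates (arithmetic right shift leaves it unchanged) while B returns the sentinel.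
-- outside the precondition, e.g. on getprv(-1): A does not finish within the time limit, B returns -1
import Mathlib
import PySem

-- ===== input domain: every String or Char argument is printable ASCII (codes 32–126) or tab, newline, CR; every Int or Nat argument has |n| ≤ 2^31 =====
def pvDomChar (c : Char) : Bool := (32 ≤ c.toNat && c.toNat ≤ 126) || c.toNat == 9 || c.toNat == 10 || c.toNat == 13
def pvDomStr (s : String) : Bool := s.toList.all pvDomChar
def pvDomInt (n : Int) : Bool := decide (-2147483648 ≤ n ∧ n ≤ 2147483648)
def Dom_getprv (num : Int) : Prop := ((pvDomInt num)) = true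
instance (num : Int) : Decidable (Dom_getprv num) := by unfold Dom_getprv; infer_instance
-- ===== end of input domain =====

-- B replaces A's two counting while-loops by the closed-form "previous snoob" bit trick
-- (alternative algorithm, same exact values on Pre_).

-- ===== PORT A =====
-- A-side helpers: A's two while-loops, transcribed with fuel (64 iterations never run out
-- on the admitted domain; outside Pre_ the Python loop never terminates).
def getprvL1 : Nat → Int → Nat → Int × Nat
  | 0, tmp, c1 => (tmp, c1)
  | fuel+1, tmp, c1 =>
    if PySem.Int.band tmp 1 = 1 then getprvL1 fuel (tmp >>> (1:Nat)) (c1+1) else (tmp, c1)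

def getprvL2 : Nat → Int → Nat → Int × Nat
  | 0, tmp, c0 => (tmp, c0)
  | fuel+1, tmp, c0 =>
    if PySem.Int.band tmp 1 = 0 ∧ tmp ≠ 0 then getprvL2 fuel (tmp >>> (1:Nat)) (c0+1) else (tmp, c0)

def getprv (num : Int) : Int :=
  let r1 := getprvL1 64 num 0
  let tmp := r1.1
  let c1 := r1.2
  if tmp = 0 then -1
  else
    let c0 := (getprvL2 64 tmp 0).2
    let p := c0 + c1
    let num1 := PySem.Int.band num (Int.not 0 <<< (p+1))
    let mask : Int := ((1 : Int) <<< (c1+1)) - 1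
    PySem.Int.bor num1 (mask <<< (c0-1))

-- ===== PORT B =====
def getprv_alt (num : Int) : Int :=
  let m := PySem.Int.band num (num + 1)
  if m = 0 then -1
  else
    let r := PySem.Int.band m (-m)
    let ones := PySem.Int.bxor num m
    let step := PySem.Int.floordiv r (2 * (ones + 1))
    num - r - ones + step * (2 * ones + 1)

-- ===== PRECONDITION & SPEC =====
-- Pre_ excludes only the all-ones negative integer, where A's first while loop never
-- terminates (arithmetic right shift leaves it unchanged); A returns normally elsewhere.
def Pre_getprv (num : Int) : Prop := num ≠ -1
instance (num : Int) : Decidable (Pre_getprv num) := by unfold Pre_getprv; infer_instance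
def pvWitness_getprv : Int := 2
def Spec_getprv (num : Int) (out : Int) : Prop := out = getprv_alt num
instance (num : Int) (out : Int) : Decidable (Spec_getprv num out) := by unfold Spec_getprv; infer_instance

-- ===== CLAIM (what is proved, stated in full; the proofs are below) =====
def Claim_equal_getprv : Prop := ∀ (num : Int), Dom_getprv num → Pre_getprv num → Spec_getprv num (getprv num)

-- ===== LEMMAS AND PROOFS =====

-- ---- Nat-level bit facts ----
lemma nat_and_split (a b s t : Nat) (k : Nat) (hs : s < 2^k) (ht : t < 2^k) :
    (a * 2^k + s) &&& (b * 2^k + t) = (a &&& b) * 2^k + (s &&& t) := by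
  rw [Nat.mul_comm a, Nat.mul_comm b, Nat.mul_comm (a &&& b)]
  apply Nat.eq_of_testBit_eq; intro i
  rw [Nat.testBit_land, Nat.testBit_two_pow_mul_add a hs i, Nat.testBit_two_pow_mul_add b ht i,
    Nat.testBit_two_pow_mul_add (a &&& b) (Nat.lt_of_le_of_lt Nat.and_le_left hs) i,
    Nat.testBit_land, Nat.testBit_land]
  by_cases h : i < k <;> simp [h]

lemma nat_or_split (a b s t : Nat) (k : Nat) (hs : s < 2^k) (ht : t < 2^k) :
    (a * 2^k + s) ||| (b * 2^k + t) = (a ||| b) * 2^k + (s ||| t) := by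
  rw [Nat.mul_comm a, Nat.mul_comm b, Nat.mul_comm (a ||| b)]
  apply Nat.eq_of_testBit_eq; intro i
  rw [Nat.testBit_lor, Nat.testBit_two_pow_mul_add a hs i, Nat.testBit_two_pow_mul_add b ht i,
    Nat.testBit_two_pow_mul_add (a ||| b) (Nat.or_lt_two_pow hs ht) i,
    Nat.testBit_lor, Nat.testBit_lor]
  by_cases h : i < k <;> simp [h]

lemma nat_xor_split (a b s t : Nat) (k : Nat) (hs : s < 2^k) (ht : t < 2^k) :
    (a * 2^k + s) ^^^ (b * 2^k + t) = (a ^^^ b) * 2^k + (s ^^^ t) := by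
  rw [Nat.mul_comm a, Nat.mul_comm b, Nat.mul_comm (a ^^^ b)]
  apply Nat.eq_of_testBit_eq; intro i
  rw [Nat.testBit_xor, Nat.testBit_two_pow_mul_add a hs i, Nat.testBit_two_pow_mul_add b ht i,
    Nat.testBit_two_pow_mul_add (a ^^^ b) (Nat.xor_lt_two_pow hs ht) i,
    Nat.testBit_xor, Nat.testBit_xor]
  by_cases h : i < k <;> simp [h]

lemma nat_or_mask (s k : Nat) (hs : s < 2^k) : s ||| (2^k - 1) = 2^k - 1 := by
  apply Nat.eq_of_testBit_eq; intro i
  rw [Nat.testBit_lor, Nat.testBit_two_pow_sub_one]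
  by_cases h : i < k
  · simp [h]
  · have hsi : s < 2^i := lt_of_lt_of_le hs (Nat.pow_le_pow_right (by norm_num) (by omega))
    simp [h, Nat.testBit_lt_two_pow hsi]

lemma nat_pow_or_mask (c : Nat) : 2^c ||| (2^c - 1) = 2^(c+1) - 1 := by
  apply Nat.eq_of_testBit_eq; intro i
  rw [Nat.testBit_lor, Nat.testBit_two_pow, Nat.testBit_two_pow_sub_one,
    Nat.testBit_two_pow_sub_one]
  by_cases h1 : i < c <;> by_cases h2 : c = i <;> simp [h1, h2] <;> omega

lemma nat_pow_xor_mask (c : Nat) : 2^c ^^^ (2^(c+1) - 1) = 2^c - 1 := by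
  apply Nat.eq_of_testBit_eq; intro i
  rw [Nat.testBit_xor, Nat.testBit_two_pow, Nat.testBit_two_pow_sub_one,
    Nat.testBit_two_pow_sub_one]
  by_cases h1 : i < c <;> by_cases h2 : c = i <;> simp [h1, h2] <;> omega

lemma nat_mask_and_pow (c : Nat) : (2^c - 1) &&& 2^c = 0 := by
  apply Nat.eq_of_testBit_eq; intro i
  rw [Nat.testBit_land, Nat.testBit_two_pow, Nat.testBit_two_pow_sub_one]
  by_cases h2 : c = i <;> simp [h2]

lemma nat_succ_and_self (q : Nat) : (2*q+1) &&& (2*q) = 2*q := by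
  have h := nat_and_split q q 1 0 1 (by norm_num) (by norm_num)
  simpa [Nat.mul_comm] using h

lemma nat_or_low (A s' n : Nat) (h : s' < 2^n) :
    (A * 2^n + s') ||| (2^n - 1) = A * 2^n + (2^n - 1) := by
  have hp : (0:Nat) < 2^n := Nat.two_pow_pos n
  have h0 := nat_or_split A 0 s' (2^n - 1) n h (by omega)
  simpa [nat_or_mask s' n h] using h0

lemma nat_or_disj (Q y k : Nat) (hy : y < 2^k) : (Q * 2^k) ||| y = Q * 2^k + y := by
  have hp : (0:Nat) < 2^k := Nat.two_pow_pos k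
  have h := nat_or_split Q 0 0 y k hp hy
  simpa using h

-- ---- PySem.Int bitwise: one lemma per sign case of the definition ----
lemma band_cast_negSucc (a b : Nat) :
    PySem.Int.band (a : Int) (-(b : Int) - 1) = ((a - (a &&& b) : Nat) : Int) := by
  unfold PySem.Int.band
  rw [if_pos (by positivity), if_neg (by omega)]
  have h1 : (-(-(b:Int) - 1) - 1) = (b : Int) := by ring
  rw [h1]; simp

lemma band_negSucc_cast (a b : Nat) :
    PySem.Int.band (-(a : Int) - 1) (b : Int) = ((b - (b &&& a) : Nat) : Int) := by
  unfold PySem.Int.band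
  rw [if_neg (by omega), if_pos (by positivity)]
  have h1 : (-(-(a:Int) - 1) - 1) = (a : Int) := by ring
  rw [h1]; simp

lemma band_negSucc_negSucc (a b : Nat) :
    PySem.Int.band (-(a : Int) - 1) (-(b : Int) - 1) = -((a ||| b : Nat) : Int) - 1 := by
  unfold PySem.Int.band
  rw [if_neg (by omega), if_neg (by omega)]
  have h1 : (-(-(a:Int) - 1) - 1) = (a : Int) := by ring
  have h2 : (-(-(b:Int) - 1) - 1) = (b : Int) := by ring
  rw [h1, h2]; simp

lemma bor_negSucc_cast (a b : Nat) :
    PySem.Int.bor (-(a : Int) - 1) (b : Int) = -((a - (a &&& b) : Nat) : Int) - 1 := by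
  unfold PySem.Int.bor
  rw [if_neg (by omega), if_pos (by positivity)]
  have h1 : (-(-(a:Int) - 1) - 1) = (a : Int) := by ring
  rw [h1]; simp

lemma bxor_negSucc_negSucc (a b : Nat) :
    PySem.Int.bxor (-(a : Int) - 1) (-(b : Int) - 1) = ((a ^^^ b : Nat) : Int) := by
  unfold PySem.Int.bxor
  rw [if_neg (by omega), if_neg (by omega)]
  have h1 : (-(-(a:Int) - 1) - 1) = (a : Int) := by ring
  have h2 : (-(-(b:Int) - 1) - 1) = (b : Int) := by ring
  rw [h1, h2]; simp

-- ---- shapes of Int operands as casts / negated casts ----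
lemma int_nonneg_shape (q : Int) (k s : Nat) (hq : 0 ≤ q) :
    q * 2^k + (s : Int) = ((q.toNat * 2^k + s : Nat) : Int) := by
  push_cast [Int.toNat_of_nonneg hq]; ring

lemma int_neg_shape (q : Int) (k s : Nat) (hq : q < 0) (hs : s < 2^k) :
    q * 2^k + (s : Int) = -(((-q - 1).toNat * 2^k + (2^k - 1 - s) : Nat) : Int) - 1 := by
  have h1 : ((-q - 1).toNat : Int) = -q - 1 := Int.toNat_of_nonneg (by omega)
  have h2 : ((2^k - 1 - s : Nat) : Int) = ((2^k : Nat) : Int) - 1 - s := by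
    have := Nat.two_pow_pos k; omega
  push_cast [h1, h2]
  ring

lemma int_nonneg_self (q : Int) (hq : 0 ≤ q) : q = ((q.toNat : Nat) : Int) :=
  (Int.toNat_of_nonneg hq).symm

lemma int_neg_self (q : Int) (hq : q < 0) : q = -(((-q - 1).toNat : Nat) : Int) - 1 := by
  have h1 : ((-q - 1).toNat : Int) = -q - 1 := Int.toNat_of_nonneg (by omega)
  omega

lemma int_nonneg_shape0 (q : Int) (k : Nat) (hq : 0 ≤ q) :
    q * 2^k = ((q.toNat * 2^k : Nat) : Int) := by
  have h := int_nonneg_shape q k 0 hq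
  simp only [Nat.cast_zero, add_zero] at h
  exact h

lemma int_neg_shape0 (q : Int) (k : Nat) (hq : q < 0) :
    q * 2^k = -(((-q - 1).toNat * 2^k + (2^k - 1) : Nat) : Int) - 1 := by
  have h := int_neg_shape q k 0 hq (Nat.two_pow_pos k)
  simp only [Nat.cast_zero, add_zero, Nat.sub_zero] at h
  exact h

-- ---- mid-level lemmas about the bit patterns the two programs build ----
lemma L_band_mul_nn (X Y p : Nat) :
    PySem.Int.band ((X : Int) * 2^p) ((Y : Int) * 2^p)
      = (PySem.Int.band (X : Int) (Y : Int)) * 2^p := by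
  have e1 : (X : Int) * 2^p = ((X * 2^p : Nat) : Int) := by push_cast; ring
  have e2 : (Y : Int) * 2^p = ((Y * 2^p : Nat) : Int) := by push_cast; ring
  rw [e1, e2, PySem.Int.band_natCast, PySem.Int.band_natCast]
  have h := nat_and_split X Y 0 0 p (Nat.two_pow_pos p) (Nat.two_pow_pos p)
  rw [Nat.add_zero, Nat.add_zero, Nat.zero_and, Nat.add_zero] at h
  rw [h]; push_cast; ring

lemma L_band_mul_ng (X Y p : Nat) :
    PySem.Int.band ((X : Int) * 2^p) ((-(Y:Int) - 1) * 2^p)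
      = (PySem.Int.band (X : Int) (-(Y:Int) - 1)) * 2^p := by
  have hp0 : (0:Nat) < 2^p := Nat.two_pow_pos p
  have e1 : (X : Int) * 2^p = ((X * 2^p : Nat) : Int) := by push_cast; ring
  have e2 : (-(Y:Int) - 1) * 2^p = -((Y * 2^p + (2^p - 1) : Nat) : Int) - 1 := by
    push_cast [Nat.cast_sub (by omega : (1:Nat) ≤ 2^p)]; ring
  rw [e1, e2, band_cast_negSucc, band_cast_negSucc]
  have h := nat_and_split X Y 0 (2^p - 1) p hp0 (by omega)
  rw [Nat.add_zero, Nat.zero_and, Nat.add_zero] at h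
  rw [h, ← Nat.sub_mul]; push_cast; ring

lemma L_band_mul_gn (X Y p : Nat) :
    PySem.Int.band ((-(X:Int) - 1) * 2^p) ((Y : Int) * 2^p)
      = (PySem.Int.band (-(X:Int) - 1) (Y : Int)) * 2^p := by
  have hp0 : (0:Nat) < 2^p := Nat.two_pow_pos p
  have e1 : (-(X:Int) - 1) * 2^p = -((X * 2^p + (2^p - 1) : Nat) : Int) - 1 := by
    push_cast [Nat.cast_sub (by omega : (1:Nat) ≤ 2^p)]; ring
  have e2 : (Y : Int) * 2^p = ((Y * 2^p : Nat) : Int) := by push_cast; ring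
  rw [e1, e2, band_negSucc_cast, band_negSucc_cast]
  have h := nat_and_split Y X 0 (2^p - 1) p hp0 (by omega)
  rw [Nat.add_zero, Nat.zero_and, Nat.add_zero] at h
  rw [h, ← Nat.sub_mul]; push_cast; ring

lemma L_band_mul_gg (X Y p : Nat) :
    PySem.Int.band ((-(X:Int) - 1) * 2^p) ((-(Y:Int) - 1) * 2^p)
      = (PySem.Int.band (-(X:Int) - 1) (-(Y:Int) - 1)) * 2^p := by
  have hp0 : (0:Nat) < 2^p := Nat.two_pow_pos p
  have e1 : (-(X:Int) - 1) * 2^p = -((X * 2^p + (2^p - 1) : Nat) : Int) - 1 := by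
    push_cast [Nat.cast_sub (by omega : (1:Nat) ≤ 2^p)]; ring
  have e2 : (-(Y:Int) - 1) * 2^p = -((Y * 2^p + (2^p - 1) : Nat) : Int) - 1 := by
    push_cast [Nat.cast_sub (by omega : (1:Nat) ≤ 2^p)]; ring
  rw [e1, e2, band_negSucc_negSucc, band_negSucc_negSucc]
  have h := nat_or_split X Y (2^p - 1) (2^p - 1) p (by omega) (by omega)
  rw [Nat.or_self] at h
  rw [h]
  have h2 : (((X ||| Y) * 2^p + (2^p - 1) : Nat) : Int)
      = ((X ||| Y : Nat) : Int) * 2^p + 2^p - 1 := by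
    push_cast [Nat.cast_sub (by omega : (1:Nat) ≤ 2^p)]; ring
  rw [h2]; ring

lemma L_band_mul (x y : Int) (p : Nat) :
    PySem.Int.band (x * 2^p) (y * 2^p) = (PySem.Int.band x y) * 2^p := by
  rcases (by omega : 0 ≤ x ∨ x < 0) with hx | hx <;>
    rcases (by omega : 0 ≤ y ∨ y < 0) with hy | hy
  · rw [int_nonneg_self x hx, int_nonneg_self y hy, L_band_mul_nn]
  · rw [int_nonneg_self x hx, int_neg_self y hy, L_band_mul_ng]
  · rw [int_neg_self x hx, int_nonneg_self y hy, L_band_mul_gn]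
  · rw [int_neg_self x hx, int_neg_self y hy, L_band_mul_gg]

lemma L_band_odd (q : Int) : PySem.Int.band (2*q+1) (-(2*q+1)) = 1 := by
  rcases (by omega : 0 ≤ q ∨ q < 0) with hq | hq
  · have e1 : 2*q+1 = ((2*q.toNat+1 : Nat) : Int) := by
      push_cast [Int.toNat_of_nonneg hq]; ring
    have e2 : -(2*q+1) = -((2*q.toNat : Nat) : Int) - 1 := by
      push_cast [Int.toNat_of_nonneg hq]; ring
    rw [e2, e1, band_cast_negSucc, nat_succ_and_self]
    norm_num
  · have h1 : ((-q - 1).toNat : Int) = -q - 1 := Int.toNat_of_nonneg (by omega)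
    have e1 : 2*q+1 = -((2*(-q-1).toNat : Nat) : Int) - 1 := by
      push_cast [h1]; ring
    have e2 : -(2*q+1) = ((2*(-q-1).toNat+1 : Nat) : Int) := by
      push_cast [h1]; ring
    rw [e2, e1, band_negSucc_cast, nat_succ_and_self]
    norm_num

lemma L_band_clear (q : Int) (n s : Nat) (hs : s < 2^n) :
    PySem.Int.band (q * 2^n + (s : Int)) (-(2^n)) = q * 2^n := by
  have hp0 : (0:Nat) < 2^n := Nat.two_pow_pos n
  have e2 : -((2:Int)^n) = -((2^n - 1 : Nat) : Int) - 1 := by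
    push_cast [Nat.one_le_two_pow]; ring
  rcases (by omega : 0 ≤ q ∨ q < 0) with hq | hq
  · rw [int_nonneg_shape q n s hq, e2, band_cast_negSucc,
      Nat.and_two_pow_sub_one_eq_mod]
    have hmod : (q.toNat * 2^n + s) % 2^n = s := by
      rw [Nat.add_comm, Nat.add_mul_mod_self_right]
      exact Nat.mod_eq_of_lt hs
    rw [hmod, Nat.add_sub_cancel]
    push_cast [Int.toNat_of_nonneg hq]; ring
  · rw [int_neg_shape q n s hq hs, e2, band_negSucc_negSucc,
      nat_or_low _ _ _ (by omega)]
    have h1 : ((-q - 1).toNat : Int) = -q - 1 := Int.toNat_of_nonneg (by omega)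
    have h2 : (((-q - 1).toNat * 2^n + (2^n - 1) : Nat) : Int)
        = ((-q - 1).toNat : Int) * 2^n + 2^n - 1 := by
      push_cast [Nat.cast_sub (by omega : (1:Nat) ≤ 2^n)]
      ring
    rw [h2, h1]; ring

lemma L_band_pair (u : Int) (c : Nat) :
    PySem.Int.band (u * 2^(c+1) + ((2^c - 1 : Nat) : Int)) (u * 2^(c+1) + ((2^c : Nat) : Int))
      = u * 2^(c+1) := by
  have he : (2:Nat)^(c+1) = 2*2^c := by ring
  have hp0 : (0:Nat) < 2^c := Nat.two_pow_pos c
  have hs1 : (2:Nat)^c - 1 < 2^(c+1) := by omega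
  have hs2 : (2:Nat)^c < 2^(c+1) := by omega
  rcases (by omega : 0 ≤ u ∨ u < 0) with hu | hu
  · rw [int_nonneg_shape u (c+1) (2^c - 1) hu, int_nonneg_shape u (c+1) (2^c) hu,
      PySem.Int.band_natCast, nat_and_split _ _ _ _ _ hs1 hs2, Nat.and_self,
      nat_mask_and_pow, Nat.add_zero]
    push_cast [Int.toNat_of_nonneg hu]; ring
  · rw [int_neg_shape u (c+1) (2^c - 1) hu hs1, int_neg_shape u (c+1) (2^c) hu hs2,
      band_negSucc_negSucc]
    have r1 : (2:Nat)^(c+1) - 1 - (2^c - 1) = 2^c := by omega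
    have r2 : (2:Nat)^(c+1) - 1 - 2^c = 2^c - 1 := by omega
    rw [r1, r2, nat_or_split _ _ _ _ _ hs2 hs1, Nat.or_self, nat_pow_or_mask]
    have h1 : ((-u - 1).toNat : Int) = -u - 1 := Int.toNat_of_nonneg (by omega)
    have h2 : (((-u - 1).toNat * 2^(c+1) + (2^(c+1) - 1) : Nat) : Int)
        = ((-u - 1).toNat : Int) * 2^(c+1) + 2^(c+1) - 1 := by
      push_cast [Nat.cast_sub (by omega : (1:Nat) ≤ 2^(c+1))]
      ring
    rw [h2, h1]; ring

lemma L_bxor_pair (u : Int) (c : Nat) :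
    PySem.Int.bxor (u * 2^(c+1) + ((2^c - 1 : Nat) : Int)) (u * 2^(c+1))
      = ((2^c - 1 : Nat) : Int) := by
  have he : (2:Nat)^(c+1) = 2*2^c := by ring
  have hp0 : (0:Nat) < 2^c := Nat.two_pow_pos c
  have hp1 : (0:Nat) < 2^(c+1) := Nat.two_pow_pos (c+1)
  have hs1 : (2:Nat)^c - 1 < 2^(c+1) := by omega
  rcases (by omega : 0 ≤ u ∨ u < 0) with hu | hu
  · have sh : u * 2^(c+1) = ((u.toNat * 2^(c+1) + 0 : Nat) : Int) := by
      rw [int_nonneg_shape0 u (c+1) hu]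
      norm_num
    rw [int_nonneg_shape u (c+1) (2^c - 1) hu, sh, PySem.Int.bxor_natCast,
      nat_xor_split _ _ _ _ _ hs1 hp1, Nat.xor_self, Nat.xor_zero, Nat.zero_mul,
      Nat.zero_add]
  · have sh : u * 2^(c+1) = -(((-u - 1).toNat * 2^(c+1) + (2^(c+1) - 1) : Nat) : Int) - 1 :=
      int_neg_shape0 u (c+1) hu
    rw [int_neg_shape u (c+1) (2^c - 1) hu hs1, sh, bxor_negSucc_negSucc]
    have r1 : (2:Nat)^(c+1) - 1 - (2^c - 1) = 2^c := by omega
    rw [r1, nat_xor_split _ _ _ _ _ (by omega : (2:Nat)^c < 2^(c+1)) (by omega),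
      Nat.xor_self, nat_pow_xor_mask, Nat.zero_mul, Nat.zero_add]

lemma L_bor_disj (q : Int) (k y : Nat) (hy : y < 2^k) :
    PySem.Int.bor (q * 2^k) (y : Int) = q * 2^k + (y : Int) := by
  have hp0 : (0:Nat) < 2^k := Nat.two_pow_pos k
  rcases (by omega : 0 ≤ q ∨ q < 0) with hq | hq
  · have sh : q * 2^k = ((q.toNat * 2^k : Nat) : Int) := int_nonneg_shape0 q k hq
    rw [sh, PySem.Int.bor_natCast, nat_or_disj _ _ _ hy]
    push_cast [Int.toNat_of_nonneg hq]; ring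
  · have sh : q * 2^k = -(((-q - 1).toNat * 2^k + (2^k - 1) : Nat) : Int) - 1 :=
      int_neg_shape0 q k hq
    rw [sh, bor_negSucc_cast]
    have h := nat_and_split (-q - 1).toNat 0 (2^k - 1) y k (by omega) hy
    simp only [Nat.zero_mul, Nat.zero_add, Nat.and_zero] at h
    rw [h, Nat.and_comm, Nat.and_two_pow_sub_one_eq_mod, Nat.mod_eq_of_lt hy]
    have h1 : ((-q - 1).toNat : Int) = -q - 1 := Int.toNat_of_nonneg (by omega)
    have h2 : (((-q - 1).toNat * 2^k + (2^k - 1) - y : Nat) : Int)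
        = ((-q - 1).toNat : Int) * 2^k + 2^k - 1 - y := by
      have h3 : y ≤ (-q - 1).toNat * 2^k + (2^k - 1) := by
        have : (0:Nat) ≤ (-q - 1).toNat * 2^k := Nat.zero_le _
        omega
      push_cast [Nat.cast_sub h3, Nat.cast_sub (by omega : (1:Nat) ≤ 2^k)]
      ring
    rw [h2, h1]
    have h5 : (((-q - 1).toNat * 2^k + (2^k - 1) : Nat) : Int) = (-q - 1) * 2^k + 2^k - 1 := by
      push_cast [h1, Nat.one_le_two_pow]; ring
    rw [h5]; ring

-- ---- loop characterisations ----
lemma loop1_spec : ∀ (c1 fuel c : Nat) (a : Int), c1 ≤ fuel → a % 2 = 0 →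
    getprvL1 fuel (a * 2^c1 + 2^c1 - 1) c = (a, c + c1) := by
  intro c1
  induction c1 with
  | zero =>
    intro fuel c a _ ha
    have h : a * 2^0 + 2^0 - 1 = a := by ring
    rw [h]
    cases fuel with
    | zero => simp [getprvL1]
    | succ f =>
      simp only [getprvL1]
      rw [PySem.Int.band_one, PySem.Int.mod_eq_emod_of_pos (by norm_num)]
      rw [if_neg (by omega)]
      norm_num
  | succ e ih =>
    intro fuel c a hf ha
    cases fuel with
    | zero => omega
    | succ f =>
      simp only [getprvL1]
      have ht2 : a * 2^(e+1) + 2^(e+1) - 1 = 2 * (a * 2^e + 2^e - 1) + 1 := by ring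
      rw [PySem.Int.band_one, PySem.Int.mod_eq_emod_of_pos (by norm_num)]
      rw [if_pos (by omega)]
      have h3 : (a * 2^(e+1) + 2^(e+1) - 1) >>> (1:Nat) = a * 2^e + 2^e - 1 := by
        rw [Int.shiftRight_eq_div_pow]; norm_num; omega
      rw [h3, ih f (c+1) a (by omega) ha]
      simp [Prod.ext_iff]; omega

lemma loop2_spec : ∀ (c0 fuel c : Nat) (b : Int), c0 ≤ fuel → b % 2 = 1 →
    getprvL2 fuel (b * 2^c0) c = (b, c + c0) := by
  intro c0
  induction c0 with
  | zero =>
    intro fuel c b _ hb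
    have h : b * 2^0 = b := by ring
    rw [h]
    cases fuel with
    | zero => simp [getprvL2]
    | succ f =>
      simp only [getprvL2]
      rw [PySem.Int.band_one, PySem.Int.mod_eq_emod_of_pos (by norm_num)]
      rw [if_neg (by intro hand; omega)]
      norm_num
  | succ e ih =>
    intro fuel c b hf hb
    cases fuel with
    | zero => omega
    | succ f =>
      simp only [getprvL2]
      have ht2 : b * 2^(e+1) = 2 * (b * 2^e) := by ring
      rw [PySem.Int.band_one, PySem.Int.mod_eq_emod_of_pos (by norm_num)]
      have hne : b * 2^(e+1) ≠ 0 := by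
        have : b ≠ 0 := by omega
        positivity
      rw [if_pos ⟨by omega, hne⟩]
      have h3 : (b * 2^(e+1)) >>> (1:Nat) = b * 2^e := by
        rw [Int.shiftRight_eq_div_pow]; norm_num; omega
      rw [h3, ih f (c+1) b (by omega) hb]
      simp [Prod.ext_iff]; omega

-- ---- decomposition of the input ----
lemma decomp : ∀ (n : Nat) (num : Int), num.natAbs ≤ n → num ≠ -1 →
    (∃ c : Nat, num = 2^c - 1) ∨
    (∃ (q : Int) (c1 d : Nat), (num % 2 = 0 → c1 = 0) ∧
      num = q * 2^(c1+d+2) + 2^(c1+d+1) + (2^c1 - 1)) := by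
  intro n
  induction n with
  | zero =>
    intro num h _
    left; exact ⟨0, by omega⟩
  | succ n ih =>
    intro num hle hne
    by_cases h0 : num = 0
    · left; exact ⟨0, by omega⟩
    by_cases h1 : num = 1
    · left; exact ⟨1, by omega⟩
    by_cases h2 : num = -2
    · right; exact ⟨-1, 0, 0, fun _ => rfl, by norm_num [h2]⟩
    rcases Int.even_or_odd num with ⟨m, hm⟩ | ⟨m, hm⟩
    · -- num = m + m
      have hm2 : num = 2 * m := by omega
      by_cases hmo : m % 2 = 1
      · right
        refine ⟨(m-1)/2, 0, 0, fun _ => rfl, ?_⟩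
        norm_num; omega
      · have hm0 : m ≠ 0 := by omega
        have hm1 : m ≠ -1 := by omega
        have hmle : m.natAbs ≤ n := by omega
        rcases ih m hmle hm1 with ⟨c, hc⟩ | ⟨q, c1, d, hcond, heq⟩
        · exfalso
          cases c with
          | zero => simp at hc; omega
          | succ c' =>
            have h2 : (2:Int)^(c'+1) = 2 * 2^c' := by ring
            have h3 : (1:Int) ≤ 2^c' := one_le_pow₀ (by norm_num)
            omega
        · have hc1 : c1 = 0 := hcond (by omega)
          subst hc1
          right
          refine ⟨q, 0, d+1, fun _ => rfl, ?_⟩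
          rw [hm2, heq]; ring
    · -- num = 2*m + 1
      have hm1 : m ≠ -1 := by omega
      have hmle : m.natAbs ≤ n := by omega
      rcases ih m hmle hm1 with ⟨c, hc⟩ | ⟨q, c1, d, _, heq⟩
      · left; exact ⟨c+1, by rw [hm, hc]; ring⟩
      · right
        refine ⟨q, c1+1, d, fun h => absurd h (by omega), ?_⟩
        rw [hm, heq]; ring

-- ---- size bounds from the domain ----
lemma pow_bound_allones (c : Nat) (h : (2:Int)^c - 1 ≤ 2147483648) : c ≤ 64 := by
  by_contra hc
  have h1 : (2:Int)^65 ≤ 2^c := pow_le_pow_right₀ (by norm_num) (by omega)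
  have h2 : (2:Int)^65 = 36893488147419103232 := by norm_num
  linarith

lemma pow_bound_main (q : Int) (c1 d : Nat) (num : Int)
    (hlo : -2147483648 ≤ num) (hhi : num ≤ 2147483648)
    (heq : num = q * 2^(c1+d+2) + 2^(c1+d+1) + (2^c1 - 1)) : c1 + d + 1 ≤ 32 := by
  by_contra hp
  have hX1 : (2:Int)^32 ≤ 2^(c1+d) := pow_le_pow_right₀ (by norm_num) (by omega)
  have hX2 : (2:Int)^32 = 4294967296 := by norm_num
  have hc1 : (2:Int)^c1 ≤ 2^(c1+d) := pow_le_pow_right₀ (by norm_num) (by omega)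
  have hc1' : (1:Int) ≤ 2^c1 := one_le_pow₀ (by norm_num)
  have e1 : (2:Int)^(c1+d+1) = 2 * 2^(c1+d) := by ring
  have e2 : (2:Int)^(c1+d+2) = 4 * 2^(c1+d) := by ring
  rcases (by omega : 0 ≤ q ∨ q < 0) with hq | hq
  · have : (0:Int) ≤ q * 2^(c1+d+2) := mul_nonneg hq (by positivity)
    linarith
  · have : q * 2^(c1+d+2) ≤ -1 * 2^(c1+d+2) := by
      apply mul_le_mul_of_nonneg_right (by omega) (by positivity)
    linarith

-- ---- evaluation of the two ports on the decomposed input ----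
lemma A_eval_allones (c : Nat) (hc : c ≤ 64) : getprv ((2:Int)^c - 1) = -1 := by
  have h : (2:Int)^c - 1 = 0 * 2^c + 2^c - 1 := by ring
  simp only [getprv]
  rw [h, loop1_spec c 64 0 0 hc (by norm_num)]
  simp

lemma B_eval_allones (c : Nat) : getprv_alt ((2:Int)^c - 1) = -1 := by
  have h1 : (2:Int)^c - 1 = ((2^c - 1 : Nat) : Int) := by
    push_cast [Nat.one_le_two_pow]; ring
  have h2 : (2:Int)^c - 1 + 1 = ((2^c : Nat) : Int) := by push_cast; ring
  simp only [getprv_alt]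
  rw [show PySem.Int.band ((2:Int)^c - 1) ((2:Int)^c - 1 + 1)
        = PySem.Int.band ((2^c - 1 : Nat) : Int) ((2^c : Nat) : Int) by rw [← h1, ← h2],
    PySem.Int.band_natCast, nat_mask_and_pow]
  simp

lemma A_eval_main (q : Int) (c1 d : Nat) (h1 : c1 ≤ 64) (h2 : d + 1 ≤ 64) :
    getprv (q * 2^(c1+d+2) + 2^(c1+d+1) + (2^c1 - 1))
      = q * 2^(c1+d+2) + (((2^(c1+1) - 1) * 2^d : Nat) : Int) := by
  have hL1 : getprvL1 64 (q * 2^(c1+d+2) + 2^(c1+d+1) + (2^c1 - 1)) 0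
      = (q*2^(d+2)+2^(d+1), c1) := by
    have hnum : q * 2^(c1+d+2) + 2^(c1+d+1) + (2^c1 - 1)
        = (q*2^(d+2)+2^(d+1)) * 2^c1 + 2^c1 - 1 := by ring
    rw [hnum]
    have ha2 : (q*2^(d+2)+2^(d+1)) % 2 = 0 := by
      have h : q*2^(d+2)+2^(d+1) = 2*(q*2^(d+1)+2^d) := by ring
      omega
    simpa using loop1_spec c1 64 0 (q*2^(d+2)+2^(d+1)) h1 ha2
  have he : q*2^(d+2)+2^(d+1) = (2*q+1) * 2^(d+1) := by ring
  have ha : (q*2^(d+2)+2^(d+1) : Int) ≠ 0 := by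
    rw [he]; exact mul_ne_zero (by omega) (by positivity)
  have hL2 : getprvL2 64 (q*2^(d+2)+2^(d+1)) 0 = (2*q+1, d+1) := by
    rw [he]
    simpa using loop2_spec (d+1) 64 0 (2*q+1) h2 (by omega)
  simp only [getprv]
  rw [hL1]
  simp only
  rw [if_neg ha, hL2]
  simp only [Nat.add_sub_cancel]
  have hpe : d + 1 + c1 + 1 = c1+d+2 := by omega
  rw [hpe]
  have hnot : (Int.not 0 : Int) <<< (c1+d+2) = -((2:Int)^(c1+d+2)) := by
    rw [show (Int.not 0 : Int) = -1 by decide, Int.shiftLeft_eq]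
    ring
  have hnums : q * 2^(c1+d+2) + 2^(c1+d+1) + ((2:Int)^c1 - 1)
      = q * 2^(c1+d+2) + ((2^(c1+d+1) + 2^c1 - 1 : Nat) : Int) := by
    have h3 : (1:Nat) ≤ 2^c1 := Nat.one_le_two_pow
    have hcast : ((2^(c1+d+1) + 2^c1 - 1 : Nat) : Int)
        = ((2^(c1+d+1) + 2^c1 : Nat) : Int) - 1 := by
      rw [Nat.cast_sub ((Nat.one_le_two_pow).trans (Nat.le_add_left _ _))]
      norm_num
    rw [hcast]
    push_cast
    ring
  have hsb : (2:Nat)^(c1+d+1) + 2^c1 - 1 < 2^(c1+d+2) := by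
    have e : (2:Nat)^(c1+d+2) = 2*2^(c1+d+1) := by ring
    have hcc : (2:Nat)^c1 ≤ 2^(c1+d+1) := Nat.pow_le_pow_right (by norm_num) (by omega)
    have := Nat.two_pow_pos c1
    omega
  rw [hnot, hnums, L_band_clear q (c1+d+2) _ hsb]
  have hmask : ((1:Int) <<< (c1+1) - 1) <<< d = (((2^(c1+1) - 1) * 2^d : Nat) : Int) := by
    rw [Int.shiftLeft_eq, Int.shiftLeft_eq]
    push_cast [Nat.one_le_two_pow]
    ring
  have hy : (2^(c1+1) - 1) * 2^d < 2^(c1+d+2) := by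
    calc (2^(c1+1) - 1) * 2^d < 2^(c1+1) * 2^d := by
          have h5 := Nat.two_pow_pos (c1+1)
          have h6 := Nat.two_pow_pos d
          exact Nat.mul_lt_mul_of_lt_of_le (by omega) (le_refl _) h6
      _ = 2^(c1+1+d) := by rw [← Nat.pow_add]
      _ ≤ 2^(c1+d+2) := Nat.pow_le_pow_right (by norm_num) (by omega)
  rw [hmask, L_bor_disj q (c1+d+2) _ hy]

lemma B_eval_main (q : Int) (c1 d : Nat) :
    getprv_alt (q * 2^(c1+d+2) + 2^(c1+d+1) + (2^c1 - 1))
      = q * 2^(c1+d+2) + ((2:Int)^(c1+1) - 1) * 2^d := by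
  have h3 : (1:Nat) ≤ 2^c1 := Nat.one_le_two_pow
  have hn2 : q * 2^(c1+d+2) + 2^(c1+d+1) + ((2:Int)^c1 - 1) + 1
      = (q*2^(d+1)+2^d) * 2^(c1+1) + ((2^c1 : Nat) : Int) := by
    push_cast; ring
  have hn1 : q * 2^(c1+d+2) + 2^(c1+d+1) + ((2:Int)^c1 - 1)
      = (q*2^(d+1)+2^d) * 2^(c1+1) + ((2^c1 - 1 : Nat) : Int) := by
    push_cast [Nat.one_le_two_pow]; ring
  simp only [getprv_alt]
  rw [hn2, hn1, L_band_pair (q*2^(d+1)+2^d) c1]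
  have hm : (q*2^(d+1)+2^d) * 2^(c1+1) = (2*q+1)*2^(c1+d+1) := by ring
  have hmne : (q*2^(d+1)+2^d) * 2^(c1+1) ≠ 0 := by
    rw [hm]; exact mul_ne_zero (by omega) (by positivity)
  rw [if_neg hmne]
  have hr : PySem.Int.band ((q*2^(d+1)+2^d) * 2^(c1+1)) (-((q*2^(d+1)+2^d) * 2^(c1+1)))
      = 2^(c1+d+1) := by
    rw [hm, show -((2*q+1)*2^(c1+d+1)) = (-(2*q+1))*2^(c1+d+1) by ring,
      L_band_mul, L_band_odd, one_mul]
  rw [hr, L_bxor_pair (q*2^(d+1)+2^d) c1]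
  have hdiv : 2*(((2^c1 - 1 : Nat) : Int) + 1) = 2^(c1+1) := by
    push_cast [Nat.one_le_two_pow]; ring
  have hstep : PySem.Int.floordiv (2^(c1+d+1)) (2*(((2^c1 - 1 : Nat) : Int) + 1))
      = 2^d := by
    rw [hdiv, PySem.Int.floordiv_eq_ediv_of_pos (by positivity),
      show (2:Int)^(c1+d+1) = 2^d * 2^(c1+1) by ring]
    exact Int.mul_ediv_cancel _ (by positivity)
  rw [hstep]
  push_cast [Nat.one_le_two_pow]
  ring

-- ===== VERDICT (by name: the statement is the Claim_ definition above) =====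
theorem getprv_spec : Claim_equal_getprv := by
  unfold Claim_equal_getprv
  intro num hdom hpre
  unfold Spec_getprv
  unfold Pre_getprv at hpre
  unfold Dom_getprv pvDomInt at hdom
  have hdom' : -2147483648 ≤ num ∧ num ≤ 2147483648 := by simpa using hdom
  rcases decomp num.natAbs num le_rfl hpre with ⟨c, hc⟩ | ⟨q, c1, d, _, heq⟩
  · subst hc
    rw [A_eval_allones c (pow_bound_allones c (by omega)), B_eval_allones c]
  · have hb := pow_bound_main q c1 d num hdom'.1 hdom'.2 heq
    subst heq
    rw [A_eval_main q c1 d (by omega) (by omega), B_eval_main q c1 d]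
    congr 1
    push_cast [Nat.one_le_two_pow]
    ring
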